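-- pv_equiv track=rewrite | github.com/zheyuanlai/SubmodOptMC | entropy_rate/mcgen_bllmodel_gpu.py | get_state_space
-- ===== SOURCE A (Python) =====
-- def get_state_space(N, d):
--     """
--     Recursively generate the state space:
--       X = { x in ℕᵈ : sum(x) = N }.
--     Returns a list of tuples.
--     """
--     if d == 1:
--         return [(N,)]
--     state_space = []
--     for x0 in range(N + 1):
--         for tail in get_state_space(N - x0, d - 1):
--             state_space.append((x0,) + tail)
--     return state_space
-- ===== SOURCE B (Python) =====
-- def get_state_space(N, d):
--     """
--     Iteratively generate the state space X = { x in N^d : sum(x) = N }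
--     with an explicit DFS stack instead of recursion.  Returns a list of tuples
--     in the same lexicographic order.
--     """
--     out = []
--     stack = [((), N, d)]
--     while stack:
--         prefix, n, k = stack.pop()
--         if k <= 1:
--             out.append(prefix + (n,))
--         else:
--             for x0 in range(n, -1, -1):
--                 stack.append((prefix + (x0,), n - x0, k - 1))
--     return out
-- ===== Notes on version B (the rewrite author's own statement) =====
-- stated objective: alternative
-- what changed: Replaces the d-level recursion with a single explicit-stack DFS loop over (prefix, remaining, parts) frames that emits the tuples in the same lexicographic order.
-- outside the precondition, e.g. on get_state_space(-1, 0): A returns [], B returns [(-1,)]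
import Mathlib
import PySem

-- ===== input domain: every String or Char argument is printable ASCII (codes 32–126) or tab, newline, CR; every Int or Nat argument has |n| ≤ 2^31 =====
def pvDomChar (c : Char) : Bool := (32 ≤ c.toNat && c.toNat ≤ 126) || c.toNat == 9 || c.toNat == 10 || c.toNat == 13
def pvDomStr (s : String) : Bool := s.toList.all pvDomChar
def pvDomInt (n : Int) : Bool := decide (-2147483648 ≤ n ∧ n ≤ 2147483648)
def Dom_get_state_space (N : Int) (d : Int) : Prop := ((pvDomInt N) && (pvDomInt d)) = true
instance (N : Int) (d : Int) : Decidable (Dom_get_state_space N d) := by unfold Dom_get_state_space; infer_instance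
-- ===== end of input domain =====

-- B replaces A's d-level recursion by one explicit-stack DFS loop (same values, same order); equivalence is about return values only.

-- ===== PORT A =====
-- literal port of A; the 'if d ≤ 1 then []' guard only totalizes the inputs (d ≤ 0, N ≥ 0)
-- where Python A recurses forever (RecursionError) — those are outside Pre_.
def get_state_space (N : Int) (d : Int) : List (List Int) :=
  if d = 1 then [[N]]
  else if d ≤ 1 then []
  else
    (PySem.List.pyRange 0 (N + 1) 1).foldl
      (fun acc x0 =>
        acc ++ (get_state_space (N - x0) (d - 1)).map (fun tail => x0 :: tail)) []
termination_by d.toNat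
decreasing_by omega

-- ===== PORT B =====
-- stack frame: (prefix, n, k);  frame weight (n.toNat+2)^k.toNat bounds the work left in it
def pvFrameW (it : List Int × Int × Int) : Nat := (it.2.1.toNat + 2) ^ it.2.2.toNat

def pvMeasure (st : List (List Int × Int × Int)) : Nat := (st.map pvFrameW).sum

-- the weights of the frames pushed for x0 = n..0 sum to strictly less than the popped frame's weight
lemma pvSumBound (n k : Int) (hk : 2 ≤ k) :
    ((PySem.List.pyRange n (-1) (-1)).map
        (fun x0 => pvFrameW (([] : List Int) ++ [x0], n - x0, k - 1))).sum
      < (n.toNat + 2) ^ k.toNat := by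
  by_cases hn : n ≤ -1
  · rw [PySem.List.pyRange_neg_one_eq_nil hn]
    simp
  · have hbound : ∀ x ∈ (PySem.List.pyRange n (-1) (-1)).map
        (fun x0 => pvFrameW (([] : List Int) ++ [x0], n - x0, k - 1)),
        x ≤ (n.toNat + 2) ^ (k - 1).toNat := by
      intro x hx
      simp only [List.mem_map] at hx
      obtain ⟨x0, hx0, rfl⟩ := hx
      rw [PySem.List.mem_pyRange_neg_one] at hx0
      show ((n - x0).toNat + 2) ^ (k - 1).toNat ≤ (n.toNat + 2) ^ (k - 1).toNat
      exact Nat.pow_le_pow_left (by omega) _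
    have hs := List.sum_le_card_nsmul _ _ hbound
    rw [List.length_map, PySem.List.length_pyRange_neg_one, smul_eq_mul] at hs
    have hm : (n - (-1)).toNat = n.toNat + 1 := by omega
    rw [hm] at hs
    have hpos : 0 < (n.toNat + 2) ^ (k - 1).toNat := Nat.pow_pos (by omega)
    have hk1 : (k - 1).toNat + 1 = k.toNat := by omega
    have hlt : (n.toNat + 1) * (n.toNat + 2) ^ (k - 1).toNat
        < (n.toNat + 2) ^ k.toNat := by
      calc (n.toNat + 1) * (n.toNat + 2) ^ (k - 1).toNat
          < (n.toNat + 2) * (n.toNat + 2) ^ (k - 1).toNat :=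
            Nat.mul_lt_mul_of_lt_of_le (by omega) (le_refl _) hpos
        _ = (n.toNat + 2) ^ k.toNat := by rw [← hk1, pow_succ]; ring
    omega

-- the while-loop of Source B: pop a frame; k ≤ 1 emits, otherwise push the children (top of stack = head)
def pvLoop (stack : List (List Int × Int × Int)) (out : List (List Int)) : List (List Int) :=
  match stack with
  | [] => out
  | (p, n, k) :: rest =>
    if k ≤ 1 then pvLoop rest (out ++ [p ++ [n]])
    else
      pvLoop ((((PySem.List.pyRange n (-1) (-1)).map
          (fun x0 => (p ++ [x0], n - x0, k - 1))).reverse) ++ rest) out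
termination_by pvMeasure stack
decreasing_by
  · have h1 : 1 ≤ pvFrameW (p, n, k) := Nat.one_le_pow _ _ (by omega)
    simp [pvMeasure]; omega
  · have hb := pvSumBound n k (by omega)
    have heq : (List.map (fun x0 => pvFrameW (p ++ [x0], n - x0, k - 1))
          (PySem.List.pyRange n (-1) (-1))).sum
        = (List.map (fun x0 => pvFrameW (([] : List Int) ++ [x0], n - x0, k - 1))
          (PySem.List.pyRange n (-1) (-1))).sum := rfl
    have hf : pvFrameW (p, n, k) = (n.toNat + 2) ^ k.toNat := rfl
    simp only [pvMeasure, List.map_append, List.sum_append, List.map_reverse,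
      List.sum_reverse, List.map_map, Function.comp_def, List.map_cons, List.sum_cons]
    omega

def get_state_space_alt (N : Int) (d : Int) : List (List Int) :=
  pvLoop [(([] : List Int), N, d)] []

-- ===== PRECONDITION & SPEC =====
-- Pre_ restricts to the natural domain d ≥ 1: for d ≤ 0 the Python A either recurses forever
-- (RecursionError, when N ≥ 0) or returns an accidental [] (when N < 0) — a degenerate
-- nonpositive part count outside the function's meaning, which B does not mirror.
def Pre_get_state_space (N : Int) (d : Int) : Prop := 1 ≤ d
instance (N : Int) (d : Int) : Decidable (Pre_get_state_space N d) := by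
  unfold Pre_get_state_space; infer_instance
def pvWitness_get_state_space : Int × Int := (3, 2)

def Spec_get_state_space (N : Int) (d : Int) (out : List (List Int)) : Prop := out = get_state_space_alt N d
instance (N : Int) (d : Int) (out : List (List Int)) : Decidable (Spec_get_state_space N d out) := by unfold Spec_get_state_space; infer_instance

-- ===== CLAIM (what is proved, stated in full; the proofs are below) =====
def Claim_equal_get_state_space : Prop := ∀ (N : Int) (d : Int), Dom_get_state_space N d → Pre_get_state_space N d → Spec_get_state_space N d (get_state_space N d)

-- ===== LEMMAS AND PROOFS =====

lemma A_one (N : Int) : get_state_space N 1 = [[N]] := by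
  rw [get_state_space]; simp

lemma A_ge2 (N d : Int) (h : 2 ≤ d) :
    get_state_space N d
      = (PySem.List.pyRange 0 (N + 1) 1).flatMap
          (fun x0 => (get_state_space (N - x0) (d - 1)).map (fun tail => x0 :: tail)) := by
  rw [get_state_space]
  rw [if_neg (by omega), if_neg (by omega), PySem.List.foldl_append_eq_flatMap]
  simp

lemma pvLoop_eq (stack : List (List Int × Int × Int)) (out : List (List Int))
    (h : ∀ it ∈ stack, 1 ≤ it.2.2) :
    pvLoop stack out
      = out ++ stack.flatMap
          (fun it => (get_state_space it.2.1 it.2.2).map (fun t => it.1 ++ t)) := by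
  induction stack, out using pvLoop.induct with
  | case1 out => simp [pvLoop]
  | case2 out p n k rest hk ih =>
    have hk1 : k = 1 := by
      have := h (p, n, k) List.mem_cons_self
      simp at this; omega
    subst hk1
    rw [pvLoop]
    simp only [if_pos hk]
    rw [ih (fun it hit => h it (List.mem_cons_of_mem _ hit))]
    simp [A_one, List.append_assoc]
  | case3 out p n k rest hk ih =>
    have hk2 : 2 ≤ k := by
      have := h (p, n, k) List.mem_cons_self
      simp at this; omega
    rw [pvLoop]
    simp only [if_neg hk]
    rw [ih ?hrest]
    case hrest =>
      intro it hit
      rcases List.mem_append.mp hit with hl | hr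
      · rw [List.mem_reverse] at hl
        obtain ⟨x0, _, rfl⟩ := List.mem_map.mp hl
        simp; omega
      · exact h it (List.mem_cons_of_mem _ hr)
    rw [List.flatMap_cons, List.flatMap_append]
    congr 1
    show _ = (get_state_space n k).map (fun t => p ++ t) ++ _
    rw [A_ge2 n k hk2, PySem.List.pyRange_neg_one_eq_reverse]
    norm_num
    rw [List.flatMap_map, List.map_flatMap]
    congr 1
    funext x0
    rw [List.map_map]
    congr 1
    funext t
    simp

-- ===== VERDICT (by name: the statement is the Claim_ definition above) =====
theorem get_state_space_spec : Claim_equal_get_state_space := by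
  intro N d _ hpre
  unfold Spec_get_state_space get_state_space_alt
  rw [pvLoop_eq _ _ (by intro it hit; simp at hit; subst hit; exact hpre)]
  simp
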